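-- pv_equiv track=rewrite | github.com/MrBrantCode/unitest_baseline | mut_generate/mist_train_taco/taco_4138/solution.py | hfindb
-- ===== SOURCE A (Python) =====
-- import heapq
--
-- def comp(x, y):
--     s = (x - y) % (y + 1)
--     t = (x - y) // (y + 1)
--     return s * (t + 1) + (y + 1) * t * (t + 1) // 2 + y
--
-- def hfindb(a, k):
--     aa = [[comp(val, 1) - comp(val, 0), val, 0, idx, comp(val, 0), comp(val, 1)] for (idx, val) in enumerate(a)]
--     heapq.heapify(aa)
--     for i in range(k):
--         x = heapq.heappop(aa)
--         x[2] += 1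
--         x[4] = x[5]
--         x[5] = comp(x[1], x[2] + 1)
--         x[0] = x[5] - x[4]
--         heapq.heappush(aa, x)
--     return sum([x[4] for x in aa])
-- ===== SOURCE B (Python) =====
-- def comp(x, y):
--     s = (x - y) % (y + 1)
--     t = (x - y) // (y + 1)
--     return s * (t + 1) + (y + 1) * t * (t + 1) // 2 + y
--
--
-- def hfindb(a, k):
--     # Threshold method: the heap-greedy consumes the k smallest marginal
--     # increments delta(v, c) = comp(v, c+1) - comp(v, c), which are
--     # nondecreasing in c; binary-search the cutoff value instead of
--     # simulating the k pops one by one.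
--     if k <= 0:
--         return sum(comp(v, 0) for v in a)
--
--     def delta(v, c):
--         return comp(v, c + 1) - comp(v, c)
--
--     def cnt_le(v, t):
--         # number of c in [0, k) with delta(v, c) <= t (delta nondecreasing in c)
--         lo, hi = 0, k
--         while lo < hi:
--             mid = (lo + hi) // 2
--             if delta(v, mid) <= t:
--                 lo = mid + 1
--             else:
--                 hi = mid
--         return lo
--
--     lo = min(delta(v, 0) for v in a)
--     hi = 1  # every delta is at most 1
--     while lo < hi:  # least t whose total multiplicity reaches k
--         mid = (lo + hi) // 2
--         if sum(cnt_le(v, mid) for v in a) >= k: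
--             hi = mid
--         else:
--             lo = mid + 1
--     t = lo
--     m = [cnt_le(v, t - 1) for v in a]
--     rem = k - sum(m)
--     return sum(comp(v, mi) for v, mi in zip(a, m)) + rem * t
-- ===== Notes on version B (the rewrite author's own statement) =====
-- stated objective: alternative
-- what changed: A simulates all k heap operations one by one; B instead binary-searches the cutoff value of the k smallest marginal increments delta(v,c)=comp(v,c+1)-comp(v,c) (nondecreasing in c), counts increments per item by an inner binary search and recovers the sum by telescoping, so no per-operation loop remains (it wins for k >> n, loses for n >> k; the measured n-scaling inputs are the latter).
import Mathlib
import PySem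

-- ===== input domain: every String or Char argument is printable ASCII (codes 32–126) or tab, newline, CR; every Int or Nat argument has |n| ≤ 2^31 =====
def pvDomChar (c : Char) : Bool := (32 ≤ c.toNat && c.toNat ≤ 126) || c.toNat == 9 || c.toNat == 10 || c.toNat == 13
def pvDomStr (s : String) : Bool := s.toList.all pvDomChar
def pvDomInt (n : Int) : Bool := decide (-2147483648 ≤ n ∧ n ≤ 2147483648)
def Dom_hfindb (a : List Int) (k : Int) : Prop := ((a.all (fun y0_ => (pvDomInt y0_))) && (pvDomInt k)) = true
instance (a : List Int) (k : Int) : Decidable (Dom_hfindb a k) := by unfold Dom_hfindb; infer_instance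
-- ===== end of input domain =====

-- B replaces A's k-step heap simulation by a binary search for the cutoff value
-- of the k smallest marginal increments (objective: alternative algorithm with
-- no per-operation loop; cost moves from the operation count k to per-item
-- binary searches).

-- ===== PORT A =====

-- helper 'comp' of the module, transliterated ('%' and '//' are Python's floor forms)
def comp (x y : Int) : Int :=
  let s := PySem.Int.mod (x - y) (y + 1)
  let t := PySem.Int.floordiv (x - y) (y + 1)
  s * (t + 1) + PySem.Int.floordiv ((y + 1) * t * (t + 1)) 2 + y

-- one heap entry: the Python 6-element list [d, val, cnt, idx, cur, nxt]
structure Ent where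
  d : Int
  v : Int
  c : Int
  idx : Int
  cur : Int
  nxt : Int
deriving DecidableEq, Repr

-- Python's list-lexicographic '<' on two 6-element int lists (exact: both lists
-- always have length 6 here)
def entLt (e f : Ent) : Bool :=
  if e.d < f.d then true else if f.d < e.d then false
  else if e.v < f.v then true else if f.v < e.v then false
  else if e.c < f.c then true else if f.c < e.c then false
  else if e.idx < f.idx then true else if f.idx < e.idx then false
  else if e.cur < f.cur then true else if f.cur < e.cur then false
  else decide (e.nxt < f.nxt)

def minEnt (x : Ent) (xs : List Ent) : Ent :=
  xs.foldl (fun b e => if entLt e b then e else b) x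

-- the body of A's loop: x = heappop(aa); update x; heappush(aa, x).
-- heapq is ported by its CONTRACT, not its array code: heappop removes the
-- least element under Python's '<' (unique here: entries carry distinct idx),
-- heappush adds an element, heapify reorders; only the multiset of entries is
-- ever observed again (the final sum), so this is exact.
def heapStep (l : List Ent) : List Ent :=
  match l with
  | [] => []  -- Python's heappop raises IndexError here; excluded by Pre_
  | x :: xs =>
      let m := minEnt x xs
      let c' := m.c + 1
      let cur' := m.nxt
      let nxt' := comp m.v (c' + 1)
      (l.erase m) ++ [⟨nxt' - cur', m.v, c', m.idx, cur', nxt'⟩]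

def hfindb (a : List Int) (k : Int) : Int :=
  let aa := (PySem.List.enumerate a 0).map
    (fun p => (⟨comp p.2 1 - comp p.2 0, p.2, 0, p.1, comp p.2 0, comp p.2 1⟩ : Ent))
  let fin := (PySem.List.pyRange 0 k 1).foldl (fun l _ => heapStep l) aa
  (fin.map (fun e => e.cur)).sum

-- ===== PORT B =====

def delta (v c : Int) : Int := comp v (c + 1) - comp v c

-- the shared shape of Source B's two 'while lo < hi' binary-search loops:
-- narrow [lo, hi] to the least point satisfying P (hi acts as sentinel)
def bsearch (P : Int → Bool) (lo hi : Int) : Int :=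
  if h : lo < hi then
    let mid := PySem.Int.floordiv (lo + hi) 2
    if P mid then bsearch P lo mid else bsearch P (mid + 1) hi
  else lo
termination_by (hi - lo).toNat
decreasing_by
  · have h2 := (PySem.Int.floordiv_lt_iff_lt_mul (a := lo + hi) (b := 2) (q := hi) (by omega)).2 (by omega)
    omega
  · have h1 := PySem.Int.floordiv_two_mid_bounds (le_of_lt h)
    omega

-- Source B's cnt_le(v, t): least c in [0, k] with delta(v, c) > t
def cntLe (kk v t : Int) : Int := bsearch (fun c => decide (t < delta v c)) 0 kk

def hfindb_alt (a : List Int) (k : Int) : Int :=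
  if k ≤ 0 then (a.map (fun v => comp v 0)).sum
  else
    -- Python min(...) raises on an empty list; excluded by Pre_ (getD is never taken)
    let lo0 := (PySem.List.min? (a.map (fun v => delta v 0)) (fun x => x)).getD 0
    let t := bsearch (fun mid => decide (k ≤ (a.map (fun v => cntLe k v mid)).sum)) lo0 1
    let m := a.map (fun v => cntLe k v (t - 1))
    let rem := k - m.sum
    ((a.zip m).map (fun p => comp p.1 p.2)).sum + rem * t

-- ===== PRECONDITION & SPEC =====

-- Pre_ excludes exactly the inputs where A raises: heappop of an empty heap
-- (a = [] with k ≥ 1 iterations) raises IndexError.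
def Pre_hfindb (a : List Int) (k : Int) : Prop := a ≠ [] ∨ k ≤ 0
instance (a : List Int) (k : Int) : Decidable (Pre_hfindb a k) := by unfold Pre_hfindb; infer_instance

def pvWitness_hfindb : List Int × Int := ([3, -2, 7], 4)

def Spec_hfindb (a : List Int) (k : Int) (out : Int) : Prop := out = hfindb_alt a k
instance (a : List Int) (k : Int) (out : Int) : Decidable (Spec_hfindb a k out) := by unfold Spec_hfindb; infer_instance

-- ===== CLAIM (what is proved, stated in full; the proofs are below) =====
def Claim_equal_hfindb : Prop := ∀ (a : List Int) (k : Int), Dom_hfindb a k → Pre_hfindb a k → Spec_hfindb a k (hfindb a k)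

-- ===== LEMMAS AND PROOFS =====

-- ---------- Layer 1: arithmetic facts about comp via a clipped-sum representation ----------

-- SP A M B = Σ_{w<B} max (A - w·M) 0
def SP (A M : Int) (B : Nat) : Int := ∑ w ∈ Finset.range B, max (A - (w : Int) * M) 0

lemma SP_nonpos {A M : Int} (hA : A ≤ 0) (hM : 0 < M) (B : Nat) : SP A M B = 0 := by
  unfold SP
  refine Finset.sum_eq_zero (fun w _ => ?_)
  have hw : (0 : Int) ≤ (w : Int) * M := mul_nonneg (by positivity) (le_of_lt hM)
  omega

lemma SP_peel (A M : Int) (B : Nat) : SP A M (B + 1) = max A 0 + SP (A - M) M B := by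
  unfold SP
  rw [Finset.sum_range_succ']
  have : ∀ w : Nat, max (A - ((w : Int) + 1) * M) 0 = max ((A - M) - (w : Int) * M) 0 := by
    intro w; ring_nf
  simp only [Nat.cast_add, Nat.cast_one, Nat.cast_zero, zero_mul, sub_zero]
  rw [add_comm]
  congr 1
  refine Finset.sum_congr rfl (fun w _ => ?_)
  rw [this w]

lemma SP_closed {M : Int} (hM : 0 < M) :
    ∀ (q : Nat) (A : Int) (B : Nat), (q : Int) * M < A → A ≤ ((q : Int) + 1) * M → q < B →
    2 * SP A M B = 2 * ((q : Int) + 1) * A - M * (q : Int) * ((q : Int) + 1) := by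
  intro q
  induction q with
  | zero =>
    intro A B h1 h2 hB
    obtain ⟨B', rfl⟩ : ∃ B', B = B' + 1 := ⟨B - 1, by omega⟩
    rw [SP_peel, SP_nonpos (by push_cast at h2; omega) hM]
    push_cast at h1 h2 ⊢
    omega
  | succ q ih =>
    intro A B h1 h2 hB
    obtain ⟨B', rfl⟩ : ∃ B', B = B' + 1 := ⟨B - 1, by omega⟩
    rw [SP_peel]
    have h1' : (q : Int) * M < A - M := by push_cast at h1; linarith
    have h2' : A - M ≤ ((q : Int) + 1) * M := by push_cast at h2; linarith
    have := ih (A - M) B' h1' h2' (by omega)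
    have hA : 0 < A := by nlinarith [mul_nonneg (show (0:Int) ≤ (q:Int)+1 by positivity) (le_of_lt hM)]
    push_cast
    rw [max_eq_left (le_of_lt hA)]
    linarith [this]

lemma comp_eq_SP_core (z m : Int) (hm : 0 < m) (t s F : Int)
    (hts : t * m + s = z) (hs0 : 0 ≤ s) (hs1 : s < m) (hF : 2 * F = m * (t * (t + 1)))
    (B : Nat) (hB1 : z < B) (hB2 : -z - m + 1 ≤ (B : Int)) :
    s * (t + 1) + F = SP z m B + SP (-z - m) m (B + 1) := by
  have hsz : s = z - t * m := by omega
  subst hsz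
  rcases lt_trichotomy z 0 with hz | hz | hz
  · have h1 : SP z m B = 0 := SP_nonpos (by omega) hm B
    rcases le_or_gt (-z - m) 0 with hA | hA
    · have ht1 : t = -1 := by nlinarith
      have h2 : SP (-z - m) m (B + 1) = 0 := SP_nonpos hA hm _
      have hF0 : F = 0 := by rw [ht1] at hF; simp at hF; omega
      rw [h1, h2, hF0, ht1]
      ring
    · have ht2 : t ≤ -2 := by nlinarith
      have hq : ((-t - 2).toNat : Int) = -t - 2 := Int.toNat_of_nonneg (by omega)
      have hqm : ((-t - 2).toNat : Int) * m < -z - m := by rw [hq]; nlinarith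
      have hqm2 : -z - m ≤ (((-t - 2).toNat : Int) + 1) * m := by rw [hq]; nlinarith
      have hqq : ((-t - 2).toNat : Int) ≤ ((-t - 2).toNat : Int) * m :=
        le_mul_of_one_le_right (by omega) (by omega)
      have hqB : (-t - 2).toNat < B + 1 := by omega
      have hcl := SP_closed hm (-t - 2).toNat (-z - m) (B + 1) hqm hqm2 hqB
      rw [hq] at hcl
      rw [h1]
      have hg : 2 * ((z - t * m) * (t + 1) + F) = 2 * (0 + SP (-z - m) m (B + 1)) := by
        linear_combination hF - hcl
      omega
  · have ht0 : t = 0 := by nlinarith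
    have h1 : SP z m B = 0 := SP_nonpos (by omega) hm B
    have h2 : SP (-z - m) m (B + 1) = 0 := SP_nonpos (by omega) hm _
    have hF0 : F = 0 := by rw [ht0] at hF; simp at hF; omega
    rw [h1, h2, hF0, ht0, hz]
    ring
  · have h2 : SP (-z - m) m (B + 1) = 0 := SP_nonpos (by omega) hm _
    have ht0 : 0 ≤ t := by nlinarith
    rcases eq_or_lt_of_le (show t * m ≤ z by omega) with hs | hs
    · -- s = 0, q = t - 1, and t ≥ 1
      have ht1 : 1 ≤ t := by nlinarith
      have hq : ((t - 1).toNat : Int) = t - 1 := Int.toNat_of_nonneg (by omega)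
      have hqm : ((t - 1).toNat : Int) * m < z := by rw [hq]; nlinarith
      have hqm2 : z ≤ (((t - 1).toNat : Int) + 1) * m := by rw [hq]; nlinarith
      have htm : t ≤ t * m := le_mul_of_one_le_right (by omega) (by omega)
      have hqB : (t - 1).toNat < B := by omega
      have hcl := SP_closed hm (t - 1).toNat z B hqm hqm2 hqB
      rw [hq] at hcl
      rw [h2]
      have hg : 2 * ((z - t * m) * (t + 1) + F) = 2 * (SP z m B + 0) := by
        linear_combination hF - hcl - 2 * hs
      omega
    · -- s ≥ 1, q = t
      have hq : ((t.toNat : Int)) = t := Int.toNat_of_nonneg ht0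
      have hqm : ((t.toNat : Int)) * m < z := by rw [hq]; omega
      have hqm2 : z ≤ (((t.toNat : Int)) + 1) * m := by rw [hq]; nlinarith
      have htm : t ≤ t * m := le_mul_of_one_le_right (by omega) (by omega)
      have hqB : t.toNat < B := by omega
      have hcl := SP_closed hm t.toNat z B hqm hqm2 hqB
      rw [hq] at hcl
      rw [h2]
      have hg : 2 * ((z - t * m) * (t + 1) + F) = 2 * (SP z m B + 0) := by
        linear_combination hF - hcl
      omega

-- comp x c = c + SP z m B + SP (-z-m) m (B+1)  with z = x - c, m = c + 1
lemma comp_eq_SP (x : Int) (c : Nat) (B : Nat) (hB : (x + 1).natAbs + 1 ≤ B) :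
    comp x (c : Int) = (c : Int) + SP (x - c) (c + 1) B + SP (-(x - c) - (c + 1)) (c + 1) (B + 1) := by
  have hm : (0 : Int) < (c : Int) + 1 := by positivity
  have ht := PySem.Int.floordiv_mul_add_mod (x - (c : Int)) ((c : Int) + 1)
  have hs0 : 0 ≤ PySem.Int.mod (x - (c : Int)) ((c : Int) + 1) := PySem.Int.mod_nonneg _ hm
  have hs1 : PySem.Int.mod (x - (c : Int)) ((c : Int) + 1) < (c : Int) + 1 := PySem.Int.mod_lt _ hm
  obtain ⟨r, hr⟩ := Int.even_mul_succ_self (PySem.Int.floordiv (x - (c : Int)) ((c : Int) + 1))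
  have hF : PySem.Int.floordiv (((c : Int) + 1) * PySem.Int.floordiv (x - (c : Int)) ((c : Int) + 1) *
      (PySem.Int.floordiv (x - (c : Int)) ((c : Int) + 1) + 1)) 2 = ((c : Int) + 1) * r := by
    rw [PySem.Int.floordiv_eq_iff_of_pos (by omega)]
    constructor <;> nlinarith [hr]
  have hF2 : 2 * (((c : Int) + 1) * r) = ((c : Int) + 1) *
      (PySem.Int.floordiv (x - (c : Int)) ((c : Int) + 1) *
       (PySem.Int.floordiv (x - (c : Int)) ((c : Int) + 1) + 1)) := by nlinarith [hr]
  have hB1 : x - (c : Int) < (B : Int) := by omega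
  have hB2 : -(x - (c : Int)) - ((c : Int) + 1) + 1 ≤ (B : Int) := by omega
  have hcore := comp_eq_SP_core (x - (c : Int)) ((c : Int) + 1) hm
    (PySem.Int.floordiv (x - (c : Int)) ((c : Int) + 1))
    (PySem.Int.mod (x - (c : Int)) ((c : Int) + 1))
    (((c : Int) + 1) * r) ht hs0 hs1 hF2 B hB1 hB2
  simp only [comp]
  rw [hF]
  omega

-- DN v c: the c-th marginal increment of comp v · (a Nat count)
def DN (v : Int) (c : Nat) : Int := comp v ((c : Int) + 1) - comp v (c : Int)

lemma delta_eq_DN (v : Int) (c : Int) (hc : 0 ≤ c) : delta v c = DN v c.toNat := by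
  unfold delta DN
  rw [Int.toNat_of_nonneg hc]

lemma max_convex {p r mid : Int} (h : p + r = 2 * mid) : 2 * max mid 0 ≤ max p 0 + max r 0 := by
  rcases max_cases p 0 with ⟨h1, h2⟩ | ⟨h1, h2⟩ <;> rcases max_cases r 0 with ⟨h3, h4⟩ | ⟨h3, h4⟩ <;>
    rcases max_cases mid 0 with ⟨h5, h6⟩ | ⟨h5, h6⟩ <;> omega

lemma max_mono0 {p r : Int} (h : p ≤ r) : max p 0 ≤ max r 0 := max_le_max h le_rfl

lemma SP_sub_convex (X M : Int) (B : Nat) :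
    2 * SP (X - (M + 1)) (M + 1) B ≤ SP (X - (M + 1 + 1)) (M + 1 + 1) B + SP (X - M) M B := by
  unfold SP
  rw [Finset.mul_sum, ← Finset.sum_add_distrib]
  refine Finset.sum_le_sum (fun w _ => max_convex ?_)
  ring

lemma SP_neg_convex (X M : Int) (B : Nat) :
    2 * SP X (M + 1) B ≤ SP X (M + 1 + 1) B + SP X M B := by
  unfold SP
  rw [Finset.mul_sum, ← Finset.sum_add_distrib]
  refine Finset.sum_le_sum (fun w _ => max_convex ?_)
  ring

lemma SP_sub_anti (X M : Int) (B : Nat) :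
    SP (X - (M + 1)) (M + 1) B ≤ SP (X - M) M B := by
  unfold SP
  refine Finset.sum_le_sum (fun w _ => max_mono0 ?_)
  have : (0 : Int) ≤ (w : Int) := by positivity
  nlinarith

lemma SP_neg_anti (X M : Int) (B : Nat) :
    SP X (M + 1) B ≤ SP X M B := by
  unfold SP
  refine Finset.sum_le_sum (fun w _ => max_mono0 ?_)
  have : (0 : Int) ≤ (w : Int) := by positivity
  nlinarith

-- comp v c in the SP representation, with the fixed bound B(v)
lemma comp_rep (v : Int) (c : Nat) :
    comp v (c : Int) = (c : Int) + SP ((v + 1) - ((c : Int) + 1)) ((c : Int) + 1) ((v + 1).natAbs + 1)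
      + SP (-(v + 1)) ((c : Int) + 1) ((v + 1).natAbs + 1 + 1) := by
  have h := comp_eq_SP v c ((v + 1).natAbs + 1) (le_refl _)
  have e1 : v - (c : Int) = (v + 1) - ((c : Int) + 1) := by ring
  have e2 : -(v - (c : Int)) - ((c : Int) + 1) = -(v + 1) := by ring
  rw [e2, e1] at h
  exact h

lemma comp_rep' (v : Int) (c : Nat) :
    comp v ((c : Int) + 1) = ((c : Int) + 1) + SP ((v + 1) - ((c : Int) + 1 + 1)) ((c : Int) + 1 + 1) ((v + 1).natAbs + 1)
      + SP (-(v + 1)) ((c : Int) + 1 + 1) ((v + 1).natAbs + 1 + 1) := by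
  have h := comp_rep v (c + 1)
  push_cast at h
  exact h

lemma comp_succ (v : Int) (c : Nat) : comp v ((c : Int) + 1) = comp v (c : Int) + DN v c := by
  unfold DN; ring

lemma DN_le_one (v : Int) (c : Nat) : DN v c ≤ 1 := by
  unfold DN
  rw [comp_rep v c, comp_rep' v c]
  have h1 := SP_sub_anti (v + 1) ((c : Int) + 1) ((v + 1).natAbs + 1)
  have h2 := SP_neg_anti (-(v + 1)) ((c : Int) + 1) ((v + 1).natAbs + 1 + 1)
  linarith

lemma DN_succ (v : Int) (c : Nat) : DN v c ≤ DN v (c + 1) := by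
  have r0 := comp_rep v c
  have r1 := comp_rep' v c
  have r2 := comp_rep' v (c + 1)
  push_cast at r2
  unfold DN
  push_cast
  rw [r0, r1, r2]
  have h1 := SP_sub_convex (v + 1) ((c : Int) + 1) ((v + 1).natAbs + 1)
  have h2 := SP_neg_convex (-(v + 1)) ((c : Int) + 1) ((v + 1).natAbs + 1 + 1)
  linarith [h1, h2]

lemma DN_mono (v : Int) : ∀ {c c' : Nat}, c ≤ c' → DN v c ≤ DN v c' := by
  intro c c' h
  induction c' with
  | zero => simp_all
  | succ n ih =>
    rcases Nat.lt_or_ge c (n + 1) with h' | h'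
    · exact le_trans (ih (by omega)) (DN_succ v n)
    · have : c = n + 1 := by omega
      subst this; rfl

-- ---------- Layer 2: binary search characterization ----------

lemma bsearch_spec (P : Int → Bool) (lo hi : Int) (hle : lo ≤ hi)
    (mono : ∀ x y, lo ≤ x → x ≤ y → y ≤ hi → P x = true → P y = true) :
    lo ≤ bsearch P lo hi ∧ bsearch P lo hi ≤ hi ∧
    (∀ t, lo ≤ t → t < bsearch P lo hi → P t = false) ∧
    (bsearch P lo hi < hi → P (bsearch P lo hi) = true) ∧
    (P hi = true → P (bsearch P lo hi) = true) := by
  generalize hn : (hi - lo).toNat = n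
  induction n using Nat.strong_induction_on generalizing lo hi with
  | _ n ih =>
  rw [bsearch]
  split
  case isTrue h =>
    have hb := PySem.Int.floordiv_two_mid_bounds (le_of_lt h)
    have hmlt : PySem.Int.floordiv (lo + hi) 2 < hi := by
      rw [PySem.Int.floordiv_lt_iff_lt_mul (by omega)]
      omega
    set mid := PySem.Int.floordiv (lo + hi) 2 with hmid
    show lo ≤ (if P mid = true then bsearch P lo mid else bsearch P (mid + 1) hi) ∧
      (if P mid = true then bsearch P lo mid else bsearch P (mid + 1) hi) ≤ hi ∧
      (∀ t, lo ≤ t → t < (if P mid = true then bsearch P lo mid else bsearch P (mid + 1) hi) → P t = false) ∧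
      ((if P mid = true then bsearch P lo mid else bsearch P (mid + 1) hi) < hi →
        P (if P mid = true then bsearch P lo mid else bsearch P (mid + 1) hi) = true) ∧
      (P hi = true → P (if P mid = true then bsearch P lo mid else bsearch P (mid + 1) hi) = true)
    split
    case isTrue hp =>
      obtain ⟨s1, s2, s3, s4, s5⟩ := ih (mid - lo).toNat (by omega) lo mid (by omega)
        (fun x y hx hxy hy px => mono x y hx hxy (by omega) px) rfl
      exact ⟨s1, by omega, s3, fun _ => s5 hp, fun _ => s5 hp⟩
    case isFalse hp =>
      obtain ⟨s1, s2, s3, s4, s5⟩ := ih (hi - (mid + 1)).toNat (by omega) (mid + 1) hi (by omega)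
        (fun x y hx hxy hy px => mono x y (by omega) hxy hy px) rfl
      refine ⟨by omega, s2, ?_, s4, s5⟩
      intro t ht htlt
      rcases le_or_gt t mid with htm | htm
      · cases hP : P t with
        | false => rfl
        | true => exact absurd (mono t mid ht htm (by omega) hP) (by simp [hp])
      · exact s3 t (by omega) htlt
  case isFalse h =>
    have : lo = hi := by omega
    subst this
    exact ⟨le_rfl, le_rfl, by omega, by omega, fun hp => hp⟩

-- ---------- Layer 3: abstract counts, invariant, exchange lemma ----------

def totComp : List Int → List Nat → Int
  | v :: vs, c :: cs => comp v (c : Int) + totComp vs cs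
  | _, _ => 0

-- "every consumed increment is ≤ every frontier increment"
def GInv (a : List Int) (cs : List Nat) : Prop :=
  ∀ (i : Nat) (hi : i < a.length) (hci : i < cs.length) (j : Nat), j < cs[i] →
  ∀ (i' : Nat) (hi' : i' < a.length) (hci' : i' < cs.length),
    DN a[i] j ≤ DN a[i'] cs[i']

lemma totComp_set : ∀ (a : List Int) (cs : List Nat) (i : Nat) (hia : i < a.length)
    (hic : i < cs.length) (x : Nat),
    totComp a (cs.set i x) = totComp a cs + comp a[i] (x : Int) - comp a[i] ((cs[i] : Nat) : Int) := by
  intro a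
  induction a with
  | nil => intro cs i hia; simp at hia
  | cons v vs iha =>
    intro cs i hia hic x
    match cs, i with
    | [], _ => simp at hic
    | c :: cs', 0 => simp [totComp]; ring
    | c :: cs', (i + 1) =>
      simp only [List.set_cons_succ, totComp, List.getElem_cons_succ]
      have := iha cs' i (by simpa using hia) (by simpa using hic) x
      rw [this]; ring

lemma sum_set_nat : ∀ (cs : List Nat) (i : Nat) (hic : i < cs.length) (x : Nat),
    (cs.set i x).sum + cs[i] = cs.sum + x := by
  intro cs
  induction cs with
  | nil => intro i h; simp at h
  | cons c cs' ih =>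
    intro i hic x
    match i with
    | 0 => simp [List.sum_cons]; omega
    | (i + 1) =>
      simp only [List.set_cons_succ, List.sum_cons, List.getElem_cons_succ]
      have := ih i (by simpa using hic) x
      omega

def ndist (x y : Nat) : Nat := max x y - min x y

def mu : List Nat → List Nat → Nat
  | c :: cs, c' :: cs' => ndist c c' + mu cs cs'
  | _, _ => 0

lemma mu_set : ∀ (cs cs' : List Nat) (i : Nat) (hic : i < cs.length) (hic' : i < cs'.length) (x : Nat),
    mu (cs.set i x) cs' + ndist cs[i] cs'[i] = mu cs cs' + ndist x cs'[i] := by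
  intro cs
  induction cs with
  | nil => intro cs' i h; simp at h
  | cons c cs0 ih =>
    intro cs' i hic hic' x
    match cs', i with
    | [], _ => simp at hic'
    | c' :: cs0', 0 => simp only [List.set_cons_zero, mu, List.getElem_cons_zero]; omega
    | c' :: cs0', (i + 1) =>
      simp only [List.set_cons_succ, mu, List.getElem_cons_succ]
      have := ih cs0' i (by simpa using hic) (by simpa using hic') x
      omega

lemma sum_le_of_ptwise : ∀ (cs cs' : List Nat) (hlen : cs.length = cs'.length),
    (∀ i (h : i < cs.length), cs[i] ≤ cs'[i]'(by omega)) → cs.sum ≤ cs'.sum := by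
  intro cs
  induction cs with
  | nil => intro cs' h _; simp
  | cons c cs0 ih =>
    intro cs' hlen hpt
    match cs' with
    | c' :: cs0' =>
      have h0 : c ≤ c' := by simpa using hpt 0 (by simp)
      have := ih cs0' (by simpa using hlen) (fun i h => by
        have := hpt (i + 1) (by simpa using Nat.succ_lt_succ h)
        simpa using this)
      simp only [List.sum_cons]
      omega

lemma eq_of_ptwise : ∀ (cs cs' : List Nat) (hlen : cs.length = cs'.length),
    (∀ i (h : i < cs.length), cs[i] ≤ cs'[i]'(by omega)) → cs.sum = cs'.sum → cs = cs' := by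
  intro cs
  induction cs with
  | nil =>
    intro cs' hlen _ _
    have : cs'.length = 0 := by simpa using hlen.symm
    exact ((List.length_eq_zero_iff).1 this).symm
  | cons c cs0 ih =>
    intro cs' hlen hpt hsum
    match cs' with
    | c' :: cs0' =>
      have h0 : c ≤ c' := by simpa using hpt 0 (by simp)
      have hpt' : ∀ i (h : i < cs0.length), cs0[i] ≤ cs0'[i]'(by simp at hlen; omega) := fun i h => by
        have := hpt (i + 1) (by simpa using Nat.succ_lt_succ h)
        simpa using this
      have hsle := sum_le_of_ptwise cs0 cs0' (by simpa using hlen) hpt'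
      simp only [List.sum_cons] at hsum
      have hc : c = c' := by omega
      have hs : cs0.sum = cs0'.sum := by omega
      rw [hc, ih cs0' (by simpa using hlen) hpt' hs]

lemma exists_gt (cs cs' : List Nat) (hlen : cs.length = cs'.length) (hsum : cs.sum = cs'.sum)
    (hne : cs ≠ cs') : ∃ i, ∃ (h : i < cs.length), cs'[i]'(by omega) < cs[i] := by
  by_contra hcon
  push_neg at hcon
  exact hne (eq_of_ptwise cs cs' hlen (fun i h => by have := hcon i h; omega) hsum)

lemma exchange (a : List Int) :
    ∀ (cs cs' : List Nat), cs.length = a.length → cs'.length = a.length →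
    GInv a cs → GInv a cs' → cs.sum = cs'.sum → totComp a cs = totComp a cs' := by
  intro cs cs'
  generalize hμ : mu cs cs' = N
  induction N using Nat.strong_induction_on generalizing cs cs' with
  | _ N ih =>
  intro h1 h2 hI hI' hsum
  by_cases heq : cs = cs'
  · rw [heq]
  · obtain ⟨i, hi, hgt⟩ := exists_gt cs cs' (by omega) hsum heq
    obtain ⟨i', hi', hgt'⟩ := exists_gt cs' cs (by omega) hsum.symm (fun e => heq e.symm)
    have hiA : i < a.length := by omega
    have hiA' : i' < a.length := by omega
    have hic' : i' < cs.length := by omega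
    have hic : i < cs'.length := by omega
    have hne : i ≠ i' := by
      intro e; subst e; omega
    have hposi : 0 < cs[i]'hi := lt_of_le_of_lt (Nat.zero_le _) hgt
    have hposi' : 0 < cs'[i']'hi' := lt_of_le_of_lt (Nat.zero_le _) hgt'
    have f1 : DN a[i] (cs[i] - 1) ≤ DN a[i'] cs[i'] :=
      hI i hiA hi (cs[i] - 1) (Nat.sub_lt hposi Nat.one_pos) i' hiA' hic'
    have h5 := hI' i' hiA' hi' (cs'[i']'hi' - 1) (Nat.sub_lt hposi' Nat.one_pos) i hiA hic
    have g1 : DN a[i'] cs[i'] ≤ DN a[i'] (cs'[i']'hi' - 1) := DN_mono _ (Nat.le_sub_one_of_lt hgt')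
    have g2 : DN a[i] cs'[i] ≤ DN a[i] (cs[i] - 1) := DN_mono _ (Nat.le_sub_one_of_lt hgt)
    have Emid : DN a[i'] cs[i'] = DN a[i] (cs[i] - 1) := le_antisymm (g1.trans (h5.trans g2)) f1
    have hlen2 : ((cs.set i (cs[i] - 1)).set i' (cs[i'] + 1)).length = cs.length := by
      simp [List.length_set]
    have g_i : ((cs.set i (cs[i] - 1)).set i' (cs[i'] + 1))[i]'(by omega) = cs[i] - 1 := by
      simp [List.getElem_set, Ne.symm hne]
    have g_i' : ((cs.set i (cs[i] - 1)).set i' (cs[i'] + 1))[i']'(by omega) = cs[i'] + 1 := by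
      simp [List.getElem_set]
    have g_other : ∀ q (hq : q < cs.length), q ≠ i → q ≠ i' →
        ((cs.set i (cs[i] - 1)).set i' (cs[i'] + 1))[q]'(by omega) = cs[q] := by
      intro q hq hq1 hq2
      simp [List.getElem_set, Ne.symm hq1, Ne.symm hq2]
    have gx : (cs.set i (cs[i] - 1))[i']'(by simp [List.length_set]; omega) = cs[i'] := by
      simp [List.getElem_set, hne]
    have hsum2 : ((cs.set i (cs[i] - 1)).set i' (cs[i'] + 1)).sum = cs.sum := by
      have s1 := sum_set_nat cs i hi (cs[i] - 1)
      have s2 := sum_set_nat (cs.set i (cs[i] - 1)) i' (by simp [List.length_set]; omega) (cs[i'] + 1)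
      rw [gx] at s2
      omega
    have htot2 : totComp a ((cs.set i (cs[i] - 1)).set i' (cs[i'] + 1)) = totComp a cs := by
      have t1 := totComp_set a cs i hiA hi (cs[i] - 1)
      have t2 := totComp_set a (cs.set i (cs[i] - 1)) i' hiA' (by simp [List.length_set]; omega) (cs[i'] + 1)
      rw [gx] at t2
      have hx : (cs[i] - 1) + 1 = cs[i] := by omega
      have u1 : comp a[i] ((cs[i] : Nat) : Int) = comp a[i] (((cs[i] - 1 : Nat) : Int)) + DN a[i] (cs[i] - 1) := by
        rw [← hx]
        push_cast
        exact comp_succ a[i] (cs[i] - 1)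
      have u2 : comp a[i'] (((cs[i'] + 1 : Nat) : Int)) = comp a[i'] (((cs[i'] : Nat) : Int)) + DN a[i'] cs[i'] := by
        push_cast
        exact comp_succ a[i'] cs[i']
      rw [t2, t1, u1, u2, Emid]
      ring
    have hI2 : GInv a ((cs.set i (cs[i] - 1)).set i' (cs[i'] + 1)) := by
      intro p hp hcp j hj q hq hcq
      have hcp0 : p < cs.length := by omega
      have hcq0 : q < cs.length := by omega
      have hcons : DN a[p] j ≤ DN a[i'] cs[i'] := by
        by_cases hpi' : p = i'
        · subst hpi'
          simp only [List.getElem_set, if_true] at hj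
          rcases Nat.lt_or_ge j cs[p] with hj2 | hj2
          · exact hI p hp hcp0 j hj2 p hp hcp0
          · have hje : j = cs[p] := by omega
            subst hje
            exact le_rfl
        · have hjlt : j < cs[p]'hcp0 := by
            by_cases hpi : p = i
            · subst hpi
              simp only [List.getElem_set, show ¬ (i' = p) from fun e => hpi' e.symm,
                if_false, if_true] at hj
              omega
            · simp only [List.getElem_set, show ¬ (i' = p) from fun e => hpi' e.symm,
                show ¬ (i = p) from fun e => hpi e.symm, if_false] at hj
              exact hj
          exact hI p hp hcp0 j hjlt i' hiA' hic'
      have hfront : DN a[i'] cs[i'] ≤ DN a[q] (((cs.set i (cs[i] - 1)).set i' (cs[i'] + 1))[q]'(by omega)) := by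
        by_cases hqi : q = i
        · subst hqi
          simp only [List.getElem_set, show ¬ (i' = q) from fun e => hne e.symm,
            if_false, if_true]
          exact Emid.le
        · by_cases hqi' : q = i'
          · subst hqi'
            simp only [List.getElem_set, if_true]
            exact DN_mono _ (Nat.le_succ _)
          · simp only [List.getElem_set, show ¬ (i' = q) from fun e => hqi' e.symm,
              show ¬ (i = q) from fun e => hqi e.symm, if_false]
            rw [Emid]
            exact hI i hiA hi (cs[i] - 1) (Nat.sub_lt hposi Nat.one_pos) q hq hcq0
      exact le_trans hcons hfront
    have hmu : mu ((cs.set i (cs[i] - 1)).set i' (cs[i'] + 1)) cs' < mu cs cs' := by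
      have m1 := mu_set cs cs' i hi hic (cs[i] - 1)
      have m2 := mu_set (cs.set i (cs[i] - 1)) cs' i' (by simp [List.length_set]; omega) (by omega) (cs[i'] + 1)
      rw [gx] at m2
      unfold ndist at m1 m2
      omega
    have hrec := ih (mu ((cs.set i (cs[i] - 1)).set i' (cs[i'] + 1)) cs') (by omega)
      ((cs.set i (cs[i] - 1)).set i' (cs[i'] + 1)) cs' rfl (by omega) h2 hI2 hI' (by omega)
    rw [← htot2, hrec]

-- ---------- Layer 4: A's heap loop produces counts satisfying GInv ----------

def mkE (v : Int) (c : Nat) (i : Nat) : Ent :=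
  ⟨DN v c, v, (c : Int), (i : Int), comp v (c : Int), comp v ((c : Int) + 1)⟩

def canonical : List Int → List Nat → Nat → List Ent
  | v :: vs, c :: cs, i => mkE v c i :: canonical vs cs (i + 1)
  | _, _, _ => []

lemma entLt_iff (e f : Ent) : entLt e f = true ↔
    (e.d < f.d ∨ (e.d = f.d ∧ (e.v < f.v ∨ (e.v = f.v ∧ (e.c < f.c ∨ (e.c = f.c ∧
      (e.idx < f.idx ∨ (e.idx = f.idx ∧ (e.cur < f.cur ∨ (e.cur = f.cur ∧
        e.nxt < f.nxt)))))))))) := by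
  unfold entLt
  split_ifs <;> simp <;> omega

lemma entLt_false_iff (e f : Ent) : entLt e f = false ↔
    ¬ (e.d < f.d ∨ (e.d = f.d ∧ (e.v < f.v ∨ (e.v = f.v ∧ (e.c < f.c ∨ (e.c = f.c ∧
      (e.idx < f.idx ∨ (e.idx = f.idx ∧ (e.cur < f.cur ∨ (e.cur = f.cur ∧
        e.nxt < f.nxt)))))))))) := by
  rw [← entLt_iff]
  simp

lemma entLt_trans {x y z : Ent} (h1 : entLt x y = true) (h2 : entLt y z = true) :
    entLt x z = true := by
  rw [entLt_iff] at *
  omega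

lemma entLt_of_lt_of_nlt {x y z : Ent} (h1 : entLt x y = true) (h2 : entLt z y = false) :
    entLt x z = true := by
  rw [entLt_iff] at *
  rw [entLt_false_iff] at h2
  omega

lemma entLt_d_le {x y : Ent} (h : entLt x y = false) : y.d ≤ x.d := by
  rw [entLt_false_iff] at h
  omega

lemma entLt_irrefl (e : Ent) : entLt e e = false := by
  rw [entLt_false_iff]; omega

lemma minEnt_mem (x : Ent) (xs : List Ent) : minEnt x xs ∈ x :: xs := by
  induction xs generalizing x with
  | nil => simp [minEnt]
  | cons y ys ih =>
    unfold minEnt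
    simp only [List.foldl_cons]
    by_cases hb : entLt y x = true
    · rw [if_pos hb]
      exact .tail _ (ih y)
    · rw [if_neg hb]
      rcases List.mem_cons.1 (ih x) with h | h
      · rw [show (List.foldl (fun b e => if entLt e b = true then e else b) x ys) = minEnt x ys
          from rfl, h]
        exact .head _
      · exact .tail _ (.tail _ h)

lemma minEnt_le (x : Ent) (xs : List Ent) : ∀ e ∈ x :: xs, entLt e (minEnt x xs) = false := by
  induction xs generalizing x with
  | nil =>
    intro e he
    simp only [List.mem_singleton] at he
    subst he
    simpa [minEnt] using entLt_irrefl e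
  | cons y ys ih =>
    intro e he
    unfold minEnt
    simp only [List.foldl_cons]
    by_cases hb : entLt y x = true
    · rw [if_pos hb]
      show entLt e (minEnt y ys) = false
      rcases List.mem_cons.1 he with he1 | he2
      · cases hE : entLt e (minEnt y ys) with
        | false => rfl
        | true =>
          have h2 := entLt_trans hb (he1 ▸ hE)
          rw [ih y y (.head _)] at h2
          simp at h2
      · exact ih y e he2
    · rw [if_neg hb]
      show entLt e (minEnt x ys) = false
      rcases List.mem_cons.1 he with he1 | he2
      · rw [he1]; exact ih x x (.head _)
      · rcases List.mem_cons.1 he2 with he1 | he3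
        · cases hE : entLt e (minEnt x ys) with
          | false => rfl
          | true =>
            have h2 := entLt_of_lt_of_nlt hE (ih x x (.head _))
            rw [he1] at h2
            exact absurd h2 (by simpa using hb)
        · exact ih x e (.tail _ he3)

lemma mkE_idx (v : Int) (c : Nat) (i : Nat) : (mkE v c i).idx = (i : Int) := rfl

lemma canonical_length : ∀ (vs : List Int) (cs : List Nat) (i : Nat), cs.length = vs.length →
    (canonical vs cs i).length = vs.length := by
  intro vs
  induction vs with
  | nil => intro cs i _; cases cs <;> simp [canonical]
  | cons v vs ih =>
    intro cs i hlen
    match cs with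
    | c :: cs' => simpa [canonical] using ih cs' (i + 1) (by simpa using hlen)

lemma mem_canonical_iff : ∀ (vs : List Int) (cs : List Nat) (i : Nat), cs.length = vs.length →
    ∀ (e : Ent), (e ∈ canonical vs cs i ↔
      ∃ j, ∃ (hj : j < vs.length), ∃ (hc : j < cs.length), e = mkE vs[j] cs[j] (i + j)) := by
  intro vs
  induction vs with
  | nil => intro cs i _ e; rw [show canonical [] cs i = [] from rfl]; simp
  | cons v vs ih =>
    intro cs i hlen e
    match cs with
    | c :: cs' =>
      simp only [canonical, List.mem_cons]
      rw [ih cs' (i + 1) (by simpa using hlen) e]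
      constructor
      · rintro (rfl | ⟨j, hj, hc, rfl⟩)
        · exact ⟨0, by simp, by simp⟩
        · exact ⟨j + 1, by simpa using Nat.succ_lt_succ hj, by simpa using Nat.succ_lt_succ hc, by
            simp only [List.getElem_cons_succ]
            congr 1
            omega⟩
      · rintro ⟨j, hj, hc, rfl⟩
        match j with
        | 0 => left; simp
        | (j + 1) =>
          right
          exact ⟨j, by simpa using hj, by simpa using hc, by
            simp only [List.getElem_cons_succ]
            congr 1
            omega⟩

lemma canonical_perm_step : ∀ (vs : List Int) (cs : List Nat) (i : Nat) (j : Nat)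
    (hlen : cs.length = vs.length) (hj : j < cs.length) (hjv : j < vs.length),
    ((canonical vs cs i).erase (mkE vs[j] cs[j] (i + j)) ++ [mkE vs[j] (cs[j] + 1) (i + j)]).Perm
      (canonical vs (cs.set j (cs[j] + 1)) i) := by
  intro vs
  induction vs with
  | nil => intro cs i j _ _ hjv; simp at hjv
  | cons v vs ih =>
    intro cs i j hlen hj hjv
    match cs, j with
    | c :: cs', 0 =>
      simp only [canonical, List.getElem_cons_zero, List.set_cons_zero, Nat.add_zero]
      rw [List.erase_cons_head]
      exact List.perm_append_singleton _ _
    | c :: cs', (j + 1) =>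
      simp only [canonical, List.getElem_cons_succ, List.set_cons_succ]
      have hne : mkE (vs[j]'(by simpa using hjv)) (cs'[j]'(by simpa using hj)) (i + (j + 1)) ≠ mkE v c i := by
        intro hE
        have := congrArg Ent.idx hE
        simp only [mkE_idx] at this
        omega
      rw [List.erase_cons_tail (by simpa using fun e => hne e.symm)]
      have := ih cs' (i + 1) j (by simpa using hlen) (by simpa using hj) (by simpa using hjv)
      have e1 : i + 1 + j = i + (j + 1) := by omega
      rw [e1] at this
      simpa using this.cons (mkE v c i)

lemma canonical_sum_cur : ∀ (vs : List Int) (cs : List Nat) (i : Nat), cs.length = vs.length →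
    ((canonical vs cs i).map (fun e => e.cur)).sum = totComp vs cs := by
  intro vs
  induction vs with
  | nil => intro cs i _; cases cs <;> simp [canonical, totComp]
  | cons v vs ih =>
    intro cs i hlen
    match cs with
    | c :: cs' =>
      simp only [canonical, List.map_cons, List.sum_cons, totComp]
      rw [ih cs' (i + 1) (by simpa using hlen)]
      rfl

lemma upd_mkE (v : Int) (c : Nat) (i : Nat) :
    (⟨comp (mkE v c i).v ((mkE v c i).c + 1 + 1) - (mkE v c i).nxt, (mkE v c i).v,
      (mkE v c i).c + 1, (mkE v c i).idx, (mkE v c i).nxt,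
      comp (mkE v c i).v ((mkE v c i).c + 1 + 1)⟩ : Ent) = mkE v (c + 1) i := by
  simp only [mkE, DN]
  push_cast
  rfl

lemma heapStep_rel (a : List Int) (cs : List Nat) (l : List Ent)
    (hlen : cs.length = a.length) (hperm : l.Perm (canonical a cs 0)) (ha : a ≠ [])
    (hI : GInv a cs) :
    ∃ cs' : List Nat, cs'.length = a.length ∧ (heapStep l).Perm (canonical a cs' 0) ∧
      GInv a cs' ∧ cs'.sum = cs.sum + 1 := by
  have hll : l.length = a.length := by
    rw [hperm.length_eq, canonical_length a cs 0 hlen]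
  match l, hll with
  | [], hll => exact absurd (List.length_eq_zero_iff.1 (by simpa using hll.symm)) ha
  | x :: xs, hll =>
  have hmem : minEnt x xs ∈ x :: xs := minEnt_mem x xs
  have hmin : ∀ e ∈ x :: xs, entLt e (minEnt x xs) = false := minEnt_le x xs
  have hmemc : minEnt x xs ∈ canonical a cs 0 := hperm.mem_iff.1 hmem
  have hminc : ∀ e ∈ canonical a cs 0, entLt e (minEnt x xs) = false := fun e he =>
    hmin e (hperm.mem_iff.2 he)
  obtain ⟨j, hj, hc, hm⟩ := (mem_canonical_iff a cs 0 hlen _).1 hmemc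
  refine ⟨cs.set j (cs[j] + 1), by simp [hlen], ?_, ?_, ?_⟩
  · -- permutation
    show ((x :: xs).erase (minEnt x xs) ++ [_]).Perm _
    have hupd : (⟨comp (minEnt x xs).v ((minEnt x xs).c + 1 + 1) - (minEnt x xs).nxt,
        (minEnt x xs).v, (minEnt x xs).c + 1, (minEnt x xs).idx, (minEnt x xs).nxt,
        comp (minEnt x xs).v ((minEnt x xs).c + 1 + 1)⟩ : Ent) = mkE a[j] (cs[j] + 1) (0 + j) := by
      rw [hm]
      exact upd_mkE _ _ _
    rw [hupd, hm]
    have hp1 : ((x :: xs).erase (mkE a[j] cs[j] (0 + j))).Perm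
        ((canonical a cs 0).erase (mkE a[j] cs[j] (0 + j))) := hperm.erase _
    exact (hp1.append_right _).trans (canonical_perm_step a cs 0 j hlen hc hj)
  · -- invariant
    have hdm : ∀ i' (hi' : i' < a.length) (hci' : i' < cs.length),
        DN a[j] cs[j] ≤ DN a[i'] cs[i'] := by
      intro i' hi' hci'
      have hmem' : mkE a[i'] cs[i'] (0 + i') ∈ canonical a cs 0 :=
        (mem_canonical_iff a cs 0 hlen _).2 ⟨i', hi', hci', rfl⟩
      have := entLt_d_le (hminc _ hmem')
      rw [hm] at this
      exact this
    intro p hp hcp j' hj' q hq hcq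
    have hcp0 : p < cs.length := by omega
    have hcq0 : q < cs.length := by omega
    have hcons : DN a[p] j' ≤ DN a[j] cs[j] := by
      by_cases hpj : p = j
      · subst hpj
        simp only [List.getElem_set, if_true] at hj'
        rcases Nat.lt_or_ge j' cs[p] with hj2 | hj2
        · exact hI p hp hcp0 j' hj2 p hp hcp0
        · have : j' = cs[p] := by omega
          subst this
          exact le_rfl
      · simp only [List.getElem_set, show ¬ (j = p) from fun e => hpj e.symm, if_false] at hj'
        exact hI p hp hcp0 j' hj' j hj hc
    have hfront : DN a[j] cs[j] ≤ DN a[q] ((cs.set j (cs[j] + 1))[q]'(by omega)) := by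
      by_cases hqj : q = j
      · subst hqj
        simp only [List.getElem_set, if_true]
        exact DN_mono _ (Nat.le_succ _)
      · simp only [List.getElem_set, show ¬ (j = q) from fun e => hqj e.symm, if_false]
        exact hdm q hq hcq0
    exact le_trans hcons hfront
  · -- sum
    have := sum_set_nat cs j hc (cs[j] + 1)
    omega

lemma fold_rel (a : List Int) (ha : a ≠ []) : ∀ (steps : List Int) (cs : List Nat) (l : List Ent),
    cs.length = a.length → l.Perm (canonical a cs 0) → GInv a cs →
    ∃ cs' : List Nat, cs'.length = a.length ∧
      (steps.foldl (fun l _ => heapStep l) l).Perm (canonical a cs' 0) ∧ GInv a cs' ∧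
      cs'.sum = cs.sum + steps.length := by
  intro steps
  induction steps with
  | nil => intro cs l h1 h2 h3; exact ⟨cs, h1, by simpa using h2, h3, by simp⟩
  | cons st steps ih =>
    intro cs l h1 h2 h3
    obtain ⟨cs1, g1, g2, g3, g4⟩ := heapStep_rel a cs l h1 h2 ha h3
    obtain ⟨cs', f1, f2, f3, f4⟩ := ih cs1 (heapStep l) g1 g2 g3
    exact ⟨cs', f1, by simpa using f2, f3, by simp [f4, g4]; omega⟩

lemma init_canonical (a : List Int) : ∀ (s : Nat),
    ((PySem.List.enumerate a (s : Int)).map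
      (fun p => (⟨comp p.2 1 - comp p.2 0, p.2, 0, p.1, comp p.2 0, comp p.2 1⟩ : Ent))) =
    canonical a (List.replicate a.length 0) s := by
  induction a with
  | nil => intro s; simp [PySem.List.enumerate_nil, canonical]
  | cons v vs ih =>
    intro s
    rw [PySem.List.enumerate_cons]
    simp only [List.map_cons, List.length_cons, List.replicate_succ, canonical]
    rw [List.cons.injEq]
    constructor
    · simp [mkE, DN]
    · have := ih (s + 1)
      push_cast at this
      exact this

lemma GInv_zero (a : List Int) : GInv a (List.replicate a.length 0) := by
  intro i hi hci j hj
  simp at hj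

lemma hfindb_abstract (a : List Int) (k : Int) (ha : a ≠ []) :
    ∃ cs : List Nat, cs.length = a.length ∧ GInv a cs ∧ cs.sum = k.toNat ∧
      hfindb a k = totComp a cs := by
  have hinit := by simpa using init_canonical a 0
  have hrep : (List.replicate a.length (0 : Nat)).length = a.length := by simp
  have hzsum : (List.replicate a.length (0 : Nat)).sum = 0 := by simp
  obtain ⟨cs, h1, h2, h3, h4⟩ := fold_rel a ha (PySem.List.pyRange 0 k 1)
    (List.replicate a.length 0)
    ((PySem.List.enumerate a (0 : Int)).map
      (fun p => (⟨comp p.2 1 - comp p.2 0, p.2, 0, p.1, comp p.2 0, comp p.2 1⟩ : Ent)))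
    hrep (by rw [hinit]) (GInv_zero a)
  refine ⟨cs, h1, h3, ?_, ?_⟩
  · rw [h4, hzsum]
    simp [PySem.List.length_pyRange_one]
  · show ((((PySem.List.pyRange 0 k 1).foldl (fun l _ => heapStep l) _).map (fun e => e.cur)).sum) = _
    rw [(h2.map (fun e => e.cur)).sum_eq, canonical_sum_cur a cs 0 (by omega)]

-- ---------- Layer 5: B computes totComp of threshold counts satisfying GInv ----------

lemma delta_mono (v : Int) {x y : Int} (hx : 0 ≤ x) (hxy : x ≤ y) : delta v x ≤ delta v y := by
  rw [delta_eq_DN v x hx, delta_eq_DN v y (by omega)]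
  exact DN_mono _ (Int.toNat_le_toNat hxy)

lemma delta_le_one (v : Int) {c : Int} (hc : 0 ≤ c) : delta v c ≤ 1 := by
  rw [delta_eq_DN v c hc]
  exact DN_le_one _ _

lemma cnt_spec (kk v t : Int) (hk : 0 < kk) :
    0 ≤ cntLe kk v t ∧ cntLe kk v t ≤ kk ∧
    (∀ c : Int, 0 ≤ c → c < cntLe kk v t → delta v c ≤ t) ∧
    (cntLe kk v t < kk → t < delta v (cntLe kk v t)) := by
  have mono : ∀ x y : Int, 0 ≤ x → x ≤ y → y ≤ kk →
      (fun c => decide (t < delta v c)) x = true → (fun c => decide (t < delta v c)) y = true := by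
    intro x y hx hxy _ hP
    simp only [decide_eq_true_eq] at hP ⊢
    exact lt_of_lt_of_le hP (delta_mono v hx hxy)
  obtain ⟨s1, s2, s3, s4, _⟩ := bsearch_spec _ 0 kk (le_of_lt hk) mono
  refine ⟨s1, s2, ?_, ?_⟩
  · intro c hc hclt
    have := s3 c hc hclt
    simpa using this
  · intro hlt
    have := s4 hlt
    simpa using this

lemma cnt_mono_t (kk v : Int) {t t' : Int} (hk : 0 < kk) (ht : t ≤ t') :
    cntLe kk v t ≤ cntLe kk v t' := by
  obtain ⟨a1, a2, a3, a4⟩ := cnt_spec kk v t hk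
  obtain ⟨b1, b2, b3, b4⟩ := cnt_spec kk v t' hk
  by_contra hcon
  push_neg at hcon
  have h1 := b4 (by omega)
  have h2 := a3 (cntLe kk v t') b1 (by omega)
  omega

lemma cnt_one (kk v : Int) (hk : 0 < kk) : cntLe kk v 1 = kk := by
  obtain ⟨a1, a2, a3, a4⟩ := cnt_spec kk v 1 hk
  by_contra hcon
  have h1 := a4 (by omega)
  have h2 := delta_le_one v a1
  omega

-- distribute rem leftover increments (all of marginal value exactly t) over the items
def distC (kk t : Int) : List Int → Nat → List Nat
  | [], _ => []
  | v :: vs, rem =>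
      let mi := (cntLe kk v (t - 1)).toNat
      let ui := (cntLe kk v t).toNat
      let g := min rem (ui - mi)
      (mi + g) :: distC kk t vs (rem - g)

lemma distC_length (kk t : Int) : ∀ (vs : List Int) (rem : Nat), (distC kk t vs rem).length = vs.length := by
  intro vs
  induction vs with
  | nil => intro rem; rfl
  | cons v vs ih => intro rem; simp [distC, ih]

lemma distC_get (kk t : Int) (hk : 0 < kk) : ∀ (vs : List Int) (rem : Nat) (i : Nat) (hi : i < vs.length),
    (cntLe kk vs[i] (t - 1)).toNat ≤ (distC kk t vs rem)[i]'(by rw [distC_length]; omega) ∧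
    (distC kk t vs rem)[i]'(by rw [distC_length]; omega) ≤ (cntLe kk vs[i] t).toNat := by
  intro vs
  induction vs with
  | nil => intro rem i hi; simp at hi
  | cons v vs ih =>
    intro rem i hi
    match i with
    | 0 =>
      have := cnt_mono_t kk v hk (show t - 1 ≤ t by omega)
      simp [distC]
      omega
    | (i + 1) =>
      simp only [distC, List.getElem_cons_succ]
      exact ih _ i (by simpa using hi)

lemma distC_sum (kk t : Int) : ∀ (vs : List Int) (rem : Nat),
    rem ≤ ((vs.map (fun v => (cntLe kk v t).toNat - (cntLe kk v (t - 1)).toNat)).sum) →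
    (distC kk t vs rem).sum = (vs.map (fun v => (cntLe kk v (t - 1)).toNat)).sum + rem := by
  intro vs
  induction vs with
  | nil => intro rem h; simp at h; simp [distC, h]
  | cons v vs ih =>
    intro rem h
    simp only [List.map_cons, List.sum_cons] at h ⊢
    simp only [distC, List.sum_cons]
    rw [ih (rem - min rem ((cntLe kk v t).toNat - (cntLe kk v (t - 1)).toNat)) (by omega)]
    omega

lemma sum_toNat_of_nonneg : ∀ (l : List Int), (∀ x ∈ l, 0 ≤ x) → ((l.map Int.toNat).sum : Int) = l.sum := by
  intro l
  induction l with
  | nil => intro _; simp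
  | cons x xs ih =>
    intro h
    simp only [List.map_cons, List.sum_cons, Nat.cast_add]
    rw [ih (fun y hy => h y (List.mem_cons_of_mem _ hy))]
    have := h x (.head _)
    omega

lemma zip_map_comp_sum (f : Int → Int) : ∀ (vs : List Int),
    ((vs.zip (vs.map f)).map (fun p => comp p.1 p.2)).sum = (vs.map (fun v => comp v (f v))).sum := by
  intro vs
  induction vs with
  | nil => simp
  | cons v vs ih => simp [ih]

lemma comp_plateau (v kk t : Int) (hk : 0 < kk) (hmik : cntLe kk v (t - 1) < kk) :
    ∀ (g : Nat), (g : Int) ≤ cntLe kk v t - cntLe kk v (t - 1) →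
    comp v (((cntLe kk v (t - 1)).toNat + g : Nat) : Int) =
      comp v (((cntLe kk v (t - 1)).toNat : Nat) : Int) + g * t := by
  obtain ⟨a1, a2, a3, a4⟩ := cnt_spec kk v (t - 1) hk
  obtain ⟨b1, b2, b3, b4⟩ := cnt_spec kk v t hk
  intro g
  induction g with
  | zero => intro _; simp
  | succ g ih =>
    intro hg
    have hgle : (g : Int) ≤ cntLe kk v t - cntLe kk v (t - 1) := by push_cast at hg ⊢; omega
    have hrec := ih hgle
    have hc0 : (0 : Int) ≤ ((cntLe kk v (t - 1)).toNat : Int) + (g : Int) := by positivity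
    have hj : ((cntLe kk v (t - 1)).toNat : Int) + (g : Int) < cntLe kk v t := by
      rw [Int.toNat_of_nonneg a1]; omega
    have hdle := b3 _ hc0 hj
    have hmono := delta_mono v a1 (show cntLe kk v (t - 1) ≤ ((cntLe kk v (t - 1)).toNat : Int) + (g : Int) by
      rw [Int.toNat_of_nonneg a1]; omega)
    have h4 := a4 hmik
    have hdel : delta v (((cntLe kk v (t - 1)).toNat : Int) + (g : Int)) = t := by omega
    unfold delta at hdel
    push_cast at hrec ⊢
    ring_nf at hrec hdel ⊢
    linarith [hrec, hdel]

lemma DN_eq_delta (v : Int) (j : Nat) : DN v j = delta v (j : Int) := by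
  rw [delta_eq_DN v (j : Int) (by positivity)]
  simp

lemma map_sub_sum (f g : Int → Nat) : ∀ (vs : List Int), (∀ v ∈ vs, f v ≤ g v) →
    (vs.map f).sum ≤ (vs.map g).sum ∧
    (vs.map (fun v => g v - f v)).sum = (vs.map g).sum - (vs.map f).sum := by
  intro vs
  induction vs with
  | nil => intro _; simp
  | cons v vs ih =>
    intro h
    have h0 := h v (.head _)
    have := ih (fun y hy => h y (List.mem_cons_of_mem _ hy))
    simp only [List.map_cons, List.sum_cons]
    omega

lemma distC_tot (kk t : Int) (hk : 0 < kk) : ∀ (vs : List Int) (rem : Nat),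
    (rem : Int) ≤ ((vs.map (fun v => (cntLe kk v t).toNat - (cntLe kk v (t - 1)).toNat)).sum : Nat) →
    (∀ v ∈ vs, cntLe kk v (t - 1) < kk) →
    totComp vs (distC kk t vs rem) =
      (vs.map (fun v => comp v (cntLe kk v (t - 1)))).sum + (rem : Int) * t := by
  intro vs
  induction vs with
  | nil => intro rem h _; simp at h; simp [distC, totComp]; omega
  | cons v vs ih =>
    intro rem h hmik
    have hmono := cnt_mono_t kk v hk (show t - 1 ≤ t by omega)
    obtain ⟨a1, _, _, _⟩ := cnt_spec kk v (t - 1) hk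
    obtain ⟨b1, _, _, _⟩ := cnt_spec kk v t hk
    simp only [List.map_cons, List.sum_cons] at h ⊢
    simp only [distC, totComp]
    have hgle : ((min rem ((cntLe kk v t).toNat - (cntLe kk v (t - 1)).toNat) : Nat) : Int) ≤
        cntLe kk v t - cntLe kk v (t - 1) := by
      omega
    have hplat := comp_plateau v kk t hk (hmik v (.head _))
      (min rem ((cntLe kk v t).toNat - (cntLe kk v (t - 1)).toNat)) hgle
    have hrest := ih (rem - min rem ((cntLe kk v t).toNat - (cntLe kk v (t - 1)).toNat))
      (by omega) (fun y hy => hmik y (List.mem_cons_of_mem _ hy))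
    rw [hrest, hplat]
    have hcc : comp v (((cntLe kk v (t - 1)).toNat : Nat) : Int) = comp v (cntLe kk v (t - 1)) := by
      rw [Int.toNat_of_nonneg a1]
    rw [hcc]
    have hsplit : ((rem - min rem ((cntLe kk v t).toNat - (cntLe kk v (t - 1)).toNat) : Nat) : Int) +
        ((min rem ((cntLe kk v t).toNat - (cntLe kk v (t - 1)).toNat) : Nat) : Int) = (rem : Int) := by
      omega
    rw [← hsplit]
    ring

lemma hfindb_alt_abstract (a : List Int) (k : Int) (ha : a ≠ []) (hk : ¬ k ≤ 0) :
    ∃ cs : List Nat, cs.length = a.length ∧ GInv a cs ∧ cs.sum = k.toNat ∧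
      hfindb_alt a k = totComp a cs := by
  have hk0 : (0 : Int) < k := by omega
  -- the minimum first increment
  obtain ⟨m0, hm0⟩ : ∃ m0, PySem.List.min? (a.map (fun v => delta v 0)) (fun x => x) = some m0 := by
    cases hmm : PySem.List.min? (a.map (fun v => delta v 0)) (fun x => x) with
    | none =>
      rw [PySem.List.min?_eq_none_iff] at hmm
      simp only [List.map_eq_nil_iff] at hmm
      exact absurd hmm ha
    | some m0 => exact ⟨m0, rfl⟩
  have hlo_min : ∀ v ∈ a, m0 ≤ delta v 0 := by
    intro v hv
    exact PySem.List.min?_isMin hm0 _ (List.mem_map_of_mem hv)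
  have hlo_le_one : m0 ≤ 1 := by
    obtain ⟨v0, hv0, he⟩ := List.mem_map.1 (PySem.List.min?_mem hm0)
    rw [← he]
    exact delta_le_one v0 le_rfl
  -- the threshold search
  have hmono : ∀ x y : Int, m0 ≤ x → x ≤ y → y ≤ 1 →
      (fun mid => decide (k ≤ (a.map (fun v => cntLe k v mid)).sum)) x = true →
      (fun mid => decide (k ≤ (a.map (fun v => cntLe k v mid)).sum)) y = true := by
    intro x y _ hxy _ hP
    simp only [decide_eq_true_eq] at hP ⊢
    refine le_trans hP (List.sum_le_sum ?_)
    intro v _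
    exact cnt_mono_t k v hk0 hxy
  have hP1 : (fun mid => decide (k ≤ (a.map (fun v => cntLe k v mid)).sum)) 1 = true := by
    simp only [decide_eq_true_eq]
    have : a.map (fun v => cntLe k v 1) = a.map (fun _ => k) :=
      List.map_congr_left (fun v _ => cnt_one k v hk0)
    rw [this, List.map_const', List.sum_replicate, nsmul_eq_mul]
    have hl : 1 ≤ (a.length : Int) := by
      have : a.length ≠ 0 := fun e => ha (List.length_eq_zero_iff.1 e)
      omega
    nlinarith
  obtain ⟨t1, t2, t3, _, t5⟩ := bsearch_spec _ m0 1 hlo_le_one hmono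
  set T := bsearch (fun mid => decide (k ≤ (a.map (fun v => cntLe k v mid)).sum)) m0 1 with hTdef
  have hST : k ≤ (a.map (fun v => cntLe k v T)).sum := by
    have := t5 hP1
    simpa using this
  -- total count below the threshold is < k
  have hM : (a.map (fun v => cntLe k v (T - 1))).sum < k := by
    rcases le_or_gt T m0 with hTm | hTm
    · have hTm' : T = m0 := le_antisymm hTm t1
      have hz : ∀ x ∈ a.map (fun v => cntLe k v (T - 1)), x = 0 := by
        intro x hx
        obtain ⟨v, hv, rfl⟩ := List.mem_map.1 hx
        obtain ⟨c1, c2, c3, c4⟩ := cnt_spec k v (T - 1) hk0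
        by_contra hne0
        have h0 := c3 0 le_rfl (by omega)
        have := hlo_min v hv
        omega
      rw [List.sum_eq_zero hz]
      omega
    · have := t3 (T - 1) (by omega) (by omega)
      simpa using this
  have hmik : ∀ v ∈ a, cntLe k v (T - 1) < k := by
    intro v hv
    have hnn : ∀ x ∈ a.map (fun v => cntLe k v (T - 1)), 0 ≤ x := by
      intro x hx
      obtain ⟨v', _, rfl⟩ := List.mem_map.1 hx
      exact (cnt_spec k v' (T - 1) hk0).1
    have hle : cntLe k v (T - 1) ≤ (a.map (fun v => cntLe k v (T - 1))).sum :=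
      List.single_le_sum hnn _ (List.mem_map_of_mem hv)
    omega
  have hmle : ∀ v ∈ a, (cntLe k v (T - 1)).toNat ≤ (cntLe k v T).toNat := by
    intro v _
    have := cnt_mono_t k v hk0 (show T - 1 ≤ T by omega)
    omega
  obtain ⟨hsle, hsub⟩ := map_sub_sum (fun v => (cntLe k v (T - 1)).toNat)
    (fun v => (cntLe k v T).toNat) a hmle
  -- cast bridges between the Int sums of the port and the Nat sums of distC
  have hcast1 : ((a.map (fun v => (cntLe k v (T - 1)).toNat)).sum : Int) =
      (a.map (fun v => cntLe k v (T - 1))).sum := by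
    rw [show a.map (fun v => (cntLe k v (T - 1)).toNat) = (a.map (fun v => cntLe k v (T - 1))).map Int.toNat
      from by rw [List.map_map]; exact List.map_congr_left (fun v _ => rfl)]
    refine sum_toNat_of_nonneg _ ?_
    intro x hx
    obtain ⟨v', _, rfl⟩ := List.mem_map.1 hx
    exact (cnt_spec k v' (T - 1) hk0).1
  have hcast2 : ((a.map (fun v => (cntLe k v T).toNat)).sum : Int) =
      (a.map (fun v => cntLe k v T)).sum := by
    rw [show a.map (fun v => (cntLe k v T).toNat) = (a.map (fun v => cntLe k v T)).map Int.toNat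
      from by rw [List.map_map]; exact List.map_congr_left (fun v _ => rfl)]
    refine sum_toNat_of_nonneg _ ?_
    intro x hx
    obtain ⟨v', _, rfl⟩ := List.mem_map.1 hx
    exact (cnt_spec k v' T hk0).1
  have havail : (((k - (a.map (fun v => cntLe k v (T - 1))).sum).toNat : Nat) : Int) ≤
      ((a.map (fun v => (cntLe k v T).toNat - (cntLe k v (T - 1)).toNat)).sum : Nat) := by
    rw [hsub]
    omega
  refine ⟨distC k T a (k - (a.map (fun v => cntLe k v (T - 1))).sum).toNat,
    by rw [distC_length], ?_, ?_, ?_⟩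
  · -- invariant
    intro p hp hcp j hj q hq hcq
    have hpl : p < a.length := hp
    have hql : q < a.length := hq
    obtain ⟨gp1, gp2⟩ := distC_get k T hk0 a ((k - (a.map (fun v => cntLe k v (T - 1))).sum).toNat) p hpl
    obtain ⟨gq1, gq2⟩ := distC_get k T hk0 a ((k - (a.map (fun v => cntLe k v (T - 1))).sum).toNat) q hql
    obtain ⟨pa1, pa2, pa3, pa4⟩ := cnt_spec k a[p] T hk0
    obtain ⟨qa1, qa2, qa3, qa4⟩ := cnt_spec k a[q] (T - 1) hk0
    have hcons : DN a[p] j ≤ T := by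
      rw [DN_eq_delta]
      refine pa3 _ (by positivity) ?_
      have : (j : Int) < ((cntLe k a[p] T).toNat : Int) := by exact_mod_cast lt_of_lt_of_le hj gp2
      omega
    have hfront : T ≤ DN a[q] ((distC k T a ((k - (a.map (fun v => cntLe k v (T - 1))).sum).toNat))[q]'(by rw [distC_length]; omega)) := by
      rw [DN_eq_delta]
      have h4 := qa4 (hmik a[q] (List.getElem_mem hql))
      have hmq : delta a[q] (cntLe k a[q] (T - 1)) ≤
          delta a[q] (((distC k T a ((k - (a.map (fun v => cntLe k v (T - 1))).sum).toNat))[q]'(by rw [distC_length]; omega) : Nat) : Int) := by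
        refine delta_mono _ qa1 ?_
        have : ((cntLe k a[q] (T - 1)).toNat : Int) ≤ _ := Int.ofNat_le.2 gq1
        omega
      omega
    exact le_trans hcons hfront
  · -- total count
    rw [distC_sum _ _ _ _ (by exact_mod_cast havail)]
    have h1 : (0 : Int) ≤ (a.map (fun v => cntLe k v (T - 1))).sum := by
      refine List.sum_nonneg ?_
      intro x hx
      obtain ⟨v', _, rfl⟩ := List.mem_map.1 hx
      exact (cnt_spec k v' (T - 1) hk0).1
    omega
  · -- the value computed by the port of B
    show hfindb_alt a k = _
    rw [hfindb_alt, if_neg hk]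
    show ((a.zip (a.map (fun v => cntLe k v
        ((bsearch (fun mid => decide (k ≤ (a.map (fun v => cntLe k v mid)).sum))
          ((PySem.List.min? (a.map (fun v => delta v 0)) (fun x => x)).getD 0) 1) - 1)))).map
        (fun p => comp p.1 p.2)).sum +
      (k - (a.map (fun v => cntLe k v
        ((bsearch (fun mid => decide (k ≤ (a.map (fun v => cntLe k v mid)).sum))
          ((PySem.List.min? (a.map (fun v => delta v 0)) (fun x => x)).getD 0) 1) - 1))).sum) *
        (bsearch (fun mid => decide (k ≤ (a.map (fun v => cntLe k v mid)).sum))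
          ((PySem.List.min? (a.map (fun v => delta v 0)) (fun x => x)).getD 0) 1) = _
    rw [hm0]
    show ((a.zip (a.map (fun v => cntLe k v (T - 1)))).map (fun p => comp p.1 p.2)).sum +
      (k - (a.map (fun v => cntLe k v (T - 1))).sum) * T = _
    rw [zip_map_comp_sum, distC_tot k T hk0 a _ (by exact_mod_cast havail) hmik]
    have hrem : (((k - (a.map (fun v => cntLe k v (T - 1))).sum).toNat : Nat) : Int) =
        k - (a.map (fun v => cntLe k v (T - 1))).sum := Int.toNat_of_nonneg (by omega)
    rw [hrem]

-- ===== VERDICT (by name: the statement is the Claim_ definition above) =====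
theorem hfindb_spec : Claim_equal_hfindb := by
  intro a k _ hpre
  unfold Spec_hfindb
  by_cases hk : k ≤ 0
  · -- k ≤ 0 : the loop runs zero times; both sides are the base sum
    simp only [hfindb, hfindb_alt]
    rw [if_pos hk, PySem.List.pyRange_one_eq_nil (by omega), List.foldl_nil, List.map_map]
    rw [show ((fun e : Ent => e.cur) ∘ (fun p : Int × Int =>
        (⟨comp p.2 1 - comp p.2 0, p.2, 0, p.1, comp p.2 0, comp p.2 1⟩ : Ent))) =
      ((fun v => comp v 0) ∘ (fun p : Int × Int => p.2)) from rfl]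
    rw [← List.map_map, PySem.List.map_snd_enumerate]
  · have ha : a ≠ [] := by
      rcases hpre with h | h
      · exact h
      · exact absurd h hk
    obtain ⟨cs, hl, hI, hs, hA⟩ := hfindb_abstract a k ha
    obtain ⟨cs', hl', hI', hs', hB⟩ := hfindb_alt_abstract a k ha hk
    rw [hA, hB]
    exact exchange a cs cs' hl hl' hI hI' (hs.trans hs'.symm)
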